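-- pv_equiv track=rewrite | github.com/Adi1729/Coding_100 | ConstructArray.py | countArray
-- ===== SOURCE A (Python) =====
-- def countArray(n, k, x):
--     m = 1000000007
--     dp = [0] * n
--     for i in range(n):
--         dp[i] = [0] * 2
--
--     if (x != 1):
--         dp[0][0] = 1
--         dp[0][1] = 0
--         dp[1][0] = k - 2
--         dp[1][1] = 1
--
--     else:
--         dp[0][0] = 0
--         dp[0][1] = 1
--         dp[1][0] = k - 1  # if x==1, there are k-1 options
--         dp[1][1] = 0  # array can not be 1-1
--
--     for i in range(2, n):
--         dp[i][0] = (dp[i - 1][0] * (k - 2) + dp[i - 1][1] * (k - 1)) % m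
--         dp[i][1] = (dp[i - 1][0]) % m
--
--     return dp[n - 1][1] % m
-- ===== SOURCE B (Python) =====
-- def countArray(n, k, x):
--     # O(log n) 2x2 matrix exponentiation of A's linear recurrence.
--     m = 1000000007
--     if x != 1:
--         v = (k - 2, 1)
--     else:
--         v = (k - 1, 0)
--     M = ((k - 2) % m, (k - 1) % m, 1, 0)
--
--     def mul(A, B):
--         return ((A[0] * B[0] + A[1] * B[2]) % m, (A[0] * B[1] + A[1] * B[3]) % m,
--                 (A[2] * B[0] + A[3] * B[2]) % m, (A[2] * B[1] + A[3] * B[3]) % m)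
--
--     def mpow(e):
--         if e == 0:
--             return (1, 0, 0, 1)
--         h = mpow(e // 2)
--         hh = mul(h, h)
--         return mul(M, hh) if e % 2 == 1 else hh
--
--     P = mpow(n - 2)
--     w1 = (P[2] * v[0] + P[3] * v[1]) % m
--     return w1 % m
-- ===== Notes on version B (the rewrite author's own statement) =====
-- stated objective: faster
-- what changed: Replaces A's O(n) dp-table loop with O(log n) 2x2 matrix exponentiation (mod 1000000007) of the same linear recurrence.
-- outside the precondition, e.g. on countArray(1, 5, 2): A raises IndexError, B raises RecursionError
import Mathlib
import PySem

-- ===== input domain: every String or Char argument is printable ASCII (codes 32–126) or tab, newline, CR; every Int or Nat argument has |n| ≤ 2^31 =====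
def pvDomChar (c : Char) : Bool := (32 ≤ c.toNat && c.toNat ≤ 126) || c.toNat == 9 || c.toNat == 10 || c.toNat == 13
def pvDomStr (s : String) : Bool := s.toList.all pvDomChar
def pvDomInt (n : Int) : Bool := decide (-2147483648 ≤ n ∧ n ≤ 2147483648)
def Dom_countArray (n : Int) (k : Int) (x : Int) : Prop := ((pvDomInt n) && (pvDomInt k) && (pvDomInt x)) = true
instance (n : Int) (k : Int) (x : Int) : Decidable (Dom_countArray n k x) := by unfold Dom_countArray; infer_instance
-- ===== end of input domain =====

-- B replaces A's O(n) dp loop by O(log n) 2x2 matrix exponentiation of the same linear recurrence (return value only; A also builds a dp list it discards).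

-- ===== PORT A =====
-- dp[i] = (dp[i][0], dp[i][1]); aStep is the body of A's 'for i in range(2, n)' loop.
def aStep (k : Int) (p : Int × Int) : Int × Int :=
  (PySem.Int.mod (p.1 * (k - 2) + p.2 * (k - 1)) 1000000007,
   PySem.Int.mod p.1 1000000007)

def aLoop (k : Int) (n : Int) (i : Int) (dp : List (Int × Int)) : List (Int × Int) :=
  if i < n then
    aLoop k n (i + 1) (dp.set i.toNat (aStep k (dp.getD (i - 1).toNat (0, 0))))
  else dp
termination_by (n - i).toNat
decreasing_by omega

def countArray (n : Int) (k : Int) (x : Int) : Int :=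
  let m : Int := 1000000007
  let dp0 : List (Int × Int) := List.replicate n.toNat (0, 0)
  let dp1 : List (Int × Int) :=
    if x ≠ 1 then (dp0.set 0 (1, 0)).set 1 (k - 2, 1)
    else (dp0.set 0 (0, 1)).set 1 (k - 1, 0)
  let dp := aLoop k n 2 dp1
  PySem.Int.mod (dp.getD (n - 1).toNat (0, 0)).2 m

-- ===== PORT B =====
def bMul (A B : Int × Int × Int × Int) : Int × Int × Int × Int :=
  (PySem.Int.mod (A.1 * B.1 + A.2.1 * B.2.2.1) 1000000007,
   PySem.Int.mod (A.1 * B.2.1 + A.2.1 * B.2.2.2) 1000000007,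
   PySem.Int.mod (A.2.2.1 * B.1 + A.2.2.2 * B.2.2.1) 1000000007,
   PySem.Int.mod (A.2.2.1 * B.2.1 + A.2.2.2 * B.2.2.2) 1000000007)

def bPow (M : Int × Int × Int × Int) (e : Nat) : Int × Int × Int × Int :=
  if h : e = 0 then (1, 0, 0, 1)
  else
    let hh := bMul (bPow M (e / 2)) (bPow M (e / 2))
    if e % 2 = 1 then bMul M hh else hh
termination_by e
decreasing_by omega

-- exponent n-2 taken as a Nat: exact for n ≥ 2 (= Pre_); Python B recurses on n-2 directly
def countArray_alt (n : Int) (k : Int) (x : Int) : Int :=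
  let m : Int := 1000000007
  let v : Int × Int := if x ≠ 1 then (k - 2, 1) else (k - 1, 0)
  let M : Int × Int × Int × Int := (PySem.Int.mod (k - 2) m, PySem.Int.mod (k - 1) m, 1, 0)
  let P := bPow M (n - 2).toNat
  let w1 := PySem.Int.mod (P.2.2.1 * v.1 + P.2.2.2 * v.2) m
  PySem.Int.mod w1 m

-- ===== PRECONDITION & SPEC =====
-- A raises IndexError (dp[0]/dp[1] on a list of length n) whenever n < 2; Pre_ excludes exactly those inputs.
def Pre_countArray (n : Int) (k : Int) (x : Int) : Prop := 2 ≤ n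
instance (n : Int) (k : Int) (x : Int) : Decidable (Pre_countArray n k x) := by unfold Pre_countArray; infer_instance
def pvWitness_countArray : Int × Int × Int := (5, 3, 2)

def Spec_countArray (n : Int) (k : Int) (x : Int) (out : Int) : Prop := out = countArray_alt n k x
instance (n : Int) (k : Int) (x : Int) (out : Int) : Decidable (Spec_countArray n k x out) := by unfold Spec_countArray; infer_instance

-- ===== CLAIM (what is proved, stated in full; the proofs are below) =====
def Claim_equal_countArray : Prop := ∀ (n : Int) (k : Int) (x : Int), Dom_countArray n k x → Pre_countArray n k x → Spec_countArray n k x (countArray n k x)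

-- ===== LEMMAS AND PROOFS =====

theorem pm (a : Int) : PySem.Int.mod a 1000000007 = a % 1000000007 :=
  PySem.Int.mod_eq_emod_of_pos (by norm_num)

theorem mm (a : Int) : a % 1000000007 % 1000000007 = a % 1000000007 :=
  Int.emod_emod_of_dvd a dvd_rfl

theorem mul_mod_l (a c : Int) : (a % 1000000007 * c) % 1000000007 = (a * c) % 1000000007 := by
  rw [Int.mul_emod, mm, ← Int.mul_emod]

theorem mul_mod_r (a c : Int) : (a * (c % 1000000007)) % 1000000007 = (a * c) % 1000000007 := by
  rw [Int.mul_emod, mm, ← Int.mul_emod]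

theorem mod_arith_l (a b c d : Int) :
    (a % 1000000007 * c + b % 1000000007 * d) % 1000000007 = (a * c + b * d) % 1000000007 := by
  rw [Int.add_emod, mul_mod_l, mul_mod_l, ← Int.add_emod]

theorem mod_arith_r (a b c d : Int) :
    (a * (c % 1000000007) + b * (d % 1000000007)) % 1000000007 = (a * c + b * d) % 1000000007 := by
  rw [Int.add_emod, mul_mod_r, mul_mod_r, ← Int.add_emod]

def mulvec (A : Int × Int × Int × Int) (w : Int × Int) : Int × Int :=
  ((A.1 * w.1 + A.2.1 * w.2) % 1000000007,
   (A.2.2.1 * w.1 + A.2.2.2 * w.2) % 1000000007)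

def Mk (k : Int) : Int × Int × Int × Int :=
  ((k - 2) % 1000000007, (k - 1) % 1000000007, 1, 0)

theorem aStep_eq (k : Int) : aStep k = mulvec (Mk k) := by
  funext w
  simp only [aStep, mulvec, Mk, pm]
  refine Prod.ext ?_ ?_
  · show (w.1 * (k - 2) + w.2 * (k - 1)) % 1000000007 = _
    rw [mod_arith_l]; congr 1; ring
  · show w.1 % 1000000007 = (1 * w.1 + 0 * w.2) % 1000000007
    norm_num

theorem mulvec_mod (A : Int × Int × Int × Int) (w : Int × Int) :
    mulvec A (w.1 % 1000000007, w.2 % 1000000007) = mulvec A w := by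
  simp only [mulvec, mod_arith_r]

theorem mulvec_modded (A : Int × Int × Int × Int) (w : Int × Int) :
    ((mulvec A w).1 % 1000000007, (mulvec A w).2 % 1000000007) = mulvec A w := by
  simp only [mulvec, mm]

theorem mulvec_mul (A B : Int × Int × Int × Int) (w : Int × Int) :
    mulvec (bMul A B) w = mulvec A (mulvec B w) := by
  simp only [bMul, mulvec, pm, mod_arith_l, mod_arith_r]
  refine Prod.ext ?_ ?_ <;> · show _ % (1000000007:Int) = _ % 1000000007; congr 1; ring

theorem bPow_spec (k : Int) : ∀ (e : Nat) (w : Int × Int),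
    mulvec (bPow (Mk k) e) w = (mulvec (Mk k))^[e] (w.1 % 1000000007, w.2 % 1000000007) := by
  intro e
  induction e using Nat.strong_induction_on with
  | _ e ih =>
    intro w
    by_cases h0 : e = 0
    · subst h0
      rw [bPow]
      simp [mulvec]
    · rw [bPow, dif_neg h0]
      set q := e / 2 with hq2
      have hq : q < e := by omega
      have hh : ∀ u, mulvec (bMul (bPow (Mk k) q) (bPow (Mk k) q)) u
          = (mulvec (Mk k))^[q + q] (u.1 % 1000000007, u.2 % 1000000007) := by
        intro u
        rw [mulvec_mul, ih _ hq (mulvec (bPow (Mk k) q) u), mulvec_modded, ih _ hq u,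
            Function.iterate_add_apply]
      by_cases hodd : e % 2 = 1
      · rw [if_pos hodd, mulvec_mul, hh, show e = q + q + 1 by omega,
            Function.iterate_succ_apply']
      · rw [if_neg hodd, hh, show q + q = e by omega]

theorem aLoop_inv (k n : Int) : ∀ (c : Nat) (i : Int) (dp : List (Int × Int)) (w : Int × Int),
    c = (n - i).toNat → 2 ≤ i → i ≤ n → dp.length = n.toNat →
    dp.getD (i.toNat - 1) (0, 0) = w →
    (aLoop k n i dp).getD (n.toNat - 1) (0, 0) = (aStep k)^[(n - i).toNat] w := by
  intro c
  induction c with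
  | zero =>
    intro i dp w hc h2 hle hlen hget
    have hin : ¬ i < n := by omega
    rw [aLoop, if_neg hin]
    have hi : i = n := by omega
    subst hi
    rw [show (i - i).toNat = 0 by omega]
    simpa using hget
  | succ c ih =>
    intro i dp w hc h2 hle hlen hget
    have hin : i < n := by omega
    rw [aLoop, if_pos hin]
    have hidx : (i - 1).toNat = i.toNat - 1 := by omega
    have hlt : i.toNat < dp.length := by omega
    have hget' : (dp.set i.toNat (aStep k (dp.getD (i - 1).toNat (0, 0)))).getD
        ((i + 1).toNat - 1) (0, 0) = aStep k w := by
      have : (i + 1).toNat - 1 = i.toNat := by omega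
      rw [this, List.getD, List.getElem?_set_self (by omega), hidx, hget]
      rfl
    have := ih (i + 1) (dp.set i.toNat (aStep k (dp.getD (i - 1).toNat (0, 0)))) (aStep k w)
      (by omega) (by omega) (by omega) (by simpa using hlen) hget'
    rw [this]
    have he : (n - i).toNat = (n - (i + 1)).toNat + 1 := by omega
    rw [he, Function.iterate_succ_apply]

theorem countArray_char (n k x : Int) (hn : 2 ≤ n) :
    countArray n k x =
      ((aStep k)^[(n - 2).toNat] (if x ≠ 1 then (k - 2, 1) else (k - 1, 0))).2 % 1000000007 := by
  have hlen2 : (2:Nat) ≤ n.toNat := by omega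
  unfold countArray
  simp only [pm]
  set v : Int × Int := if x ≠ 1 then ((k - 2 : Int), (1 : Int)) else (k - 1, 0) with hv
  set dp1 : List (Int × Int) :=
    if x ≠ 1 then ((List.replicate n.toNat ((0:Int), (0:Int))).set 0 (1, 0)).set 1 (k - 2, 1)
    else ((List.replicate n.toNat ((0:Int), (0:Int))).set 0 (0, 1)).set 1 (k - 1, 0) with hdp1
  have hlen : dp1.length = n.toNat := by
    rw [hdp1]; split <;> simp
  have hget : dp1.getD ((2:Int).toNat - 1) (0, 0) = v := by
    have h1 : (1:Nat) < n.toNat := by omega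
    rw [hdp1, hv]
    split <;>
    · show List.getD _ 1 _ = _
      rw [List.getD, List.getElem?_set_self (by simpa using h1)]
      rfl
  have := aLoop_inv k n (n - 2).toNat 2 dp1 v rfl (by omega) hn hlen hget
  rw [show (n - 1).toNat = n.toNat - 1 by omega, this]

-- ===== VERDICT (by name: the statement is the Claim_ definition above) =====
theorem countArray_spec : Claim_equal_countArray := by
  intro n k x _ hn
  unfold Spec_countArray
  rw [countArray_char n k x hn]
  unfold countArray_alt
  simp only [pm]
  set v : Int × Int := if x ≠ 1 then ((k - 2 : Int), (1 : Int)) else (k - 1, 0) with hv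
  have hB : ((bPow (Mk k) (n - 2).toNat).2.2.1 * v.1 +
      (bPow (Mk k) (n - 2).toNat).2.2.2 * v.2) % 1000000007 % 1000000007
      = ((mulvec (Mk k))^[(n - 2).toNat] (v.1 % 1000000007, v.2 % 1000000007)).2 % 1000000007 := by
    rw [show ((bPow (Mk k) (n - 2).toNat).2.2.1 * v.1 +
        (bPow (Mk k) (n - 2).toNat).2.2.2 * v.2) % 1000000007
        = (mulvec (bPow (Mk k) (n - 2).toNat) v).2 from rfl, bPow_spec]
  show ((aStep k)^[(n - 2).toNat] v).2 % 1000000007 = _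
  rw [show (((k - 2) % 1000000007 : Int), ((k - 1) % 1000000007 : Int),
        (1:Int), (0:Int)) = Mk k from rfl, hB, aStep_eq]
  cases (n - 2).toNat with
  | zero => simp
  | succ s =>
    rw [Function.iterate_succ_apply, Function.iterate_succ_apply, mulvec_mod]
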